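-- pv_equiv track=rewrite | github.com/swisstopo/swissgeol-assets-dataextraction | language-detection/summarize-per-file.py | ocr_type
-- ===== SOURCE A (Python) =====
-- def ocr_type(asset_pages) -> str:
--     filtered_pages = [page for page in asset_pages if not page["title_page_type"] and page["ocr_type"]]
--     if len(filtered_pages) == 0:
--         return ""
--     if all(page["ocr_type"] == "ocr" for page in filtered_pages):
--         return "ocr"
--     if all(page["ocr_type"] == "digital" for page in filtered_pages):
--         return "digital"
--     else:
--         return "mixed"
-- ===== SOURCE B (Python) =====
-- def ocr_type(asset_pages) -> str:
--     # single-pass fold: join each kept page's class into an accumulator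
--     result = ""
--     for page in asset_pages:
--         if page["title_page_type"] or not page["ocr_type"]:
--             continue
--         t = page["ocr_type"]
--         cls = t if t in ("ocr", "digital") else "mixed"
--         if result == "":
--             result = cls
--         elif result != cls:
--             result = "mixed"
--     return result
-- ===== Notes on version B (the rewrite author's own statement) =====
-- stated objective: alternative
-- what changed: Replaces the filtered list and the two short-circuit all() scans by a single left-to-right fold: each kept page is normalized to a class ('ocr'/'digital'/'mixed') and joined into one accumulator ('' absorbs, equal classes keep, unequal classes collapse to 'mixed').
import Mathlib
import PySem

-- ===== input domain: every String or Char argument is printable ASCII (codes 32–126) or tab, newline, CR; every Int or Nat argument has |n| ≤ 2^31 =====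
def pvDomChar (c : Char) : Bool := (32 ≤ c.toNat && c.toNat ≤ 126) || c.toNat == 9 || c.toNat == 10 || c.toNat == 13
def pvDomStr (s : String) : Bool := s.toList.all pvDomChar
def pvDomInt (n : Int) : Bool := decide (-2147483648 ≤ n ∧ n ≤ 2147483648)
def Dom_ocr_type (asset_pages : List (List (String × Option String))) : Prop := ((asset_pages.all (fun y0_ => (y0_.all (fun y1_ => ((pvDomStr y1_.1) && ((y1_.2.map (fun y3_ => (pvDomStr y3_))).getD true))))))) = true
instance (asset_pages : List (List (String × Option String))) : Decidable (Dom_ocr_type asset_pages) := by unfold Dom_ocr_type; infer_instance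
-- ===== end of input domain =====

-- B replaces the filtered list and the two all() scans by a single fold joining
-- per-page classes into one accumulator; equivalence of return values on Pre_.

-- page[k] as total first-match lookup on the association list; exact under Pre_ocr_type (key present where Python evaluates it)
def pvVal (page : List (String × Option String)) (k : String) : Option String :=
  (page.lookup k).getD none

-- Python truthiness of a page value (None or "" is falsy)
def pvTruthy (v : Option String) : Bool :=
  match v with
  | none => false
  | some s => !(s == "")

-- the shared filter condition 'not page["title_page_type"] and page["ocr_type"]'
def pvKeep (page : List (String × Option String)) : Bool :=
  !pvTruthy (pvVal page "title_page_type") && pvTruthy (pvVal page "ocr_type")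

-- ===== PORT A =====
def ocr_type (asset_pages : List (List (String × Option String))) : String :=
  let filtered_pages := asset_pages.filter pvKeep
  if filtered_pages.length = 0 then ""
  else if filtered_pages.all (fun page => pvVal page "ocr_type" == some "ocr") then "ocr"
  else if filtered_pages.all (fun page => pvVal page "ocr_type" == some "digital") then "digital"
  else "mixed"

-- ===== PORT B =====
-- "cls = t if t in ('ocr', 'digital') else 'mixed'"
def pvCls (t : Option String) : String :=
  if t == some "ocr" || t == some "digital" then (t.getD "") else "mixed"

-- the accumulator update of B's loop body
def pvJoin (r cls : String) : String :=
  if r == "" then cls else if !(r == cls) then "mixed" else r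

def ocr_type_alt (asset_pages : List (List (String × Option String))) : String :=
  asset_pages.foldl (fun r page =>
    if pvTruthy (pvVal page "title_page_type") || !pvTruthy (pvVal page "ocr_type") then r
    else pvJoin r (pvCls (pvVal page "ocr_type"))) ""

-- ===== PRECONDITION & SPEC =====
-- Pre_ excludes exactly the inputs where the Python raises KeyError: a page missing
-- "title_page_type", or missing "ocr_type" while "title_page_type" is falsy.
def pvPageOk (page : List (String × Option String)) : Bool :=
  (page.lookup "title_page_type").isSome &&
    (pvTruthy (pvVal page "title_page_type") || (page.lookup "ocr_type").isSome)

def Pre_ocr_type (asset_pages : List (List (String × Option String))) : Prop :=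
  ∀ page ∈ asset_pages, pvPageOk page = true
instance (asset_pages : List (List (String × Option String))) : Decidable (Pre_ocr_type asset_pages) := by unfold Pre_ocr_type; infer_instance

def pvWitness_ocr_type : (List (List (String × Option String))) :=
  [[("title_page_type", none), ("ocr_type", some "ocr")],
   [("title_page_type", some "title"), ("ocr_type", none)]]

def Spec_ocr_type (asset_pages : List (List (String × Option String))) (out : String) : Prop := out = ocr_type_alt asset_pages
instance (asset_pages : List (List (String × Option String))) (out : String) : Decidable (Spec_ocr_type asset_pages out) := by unfold Spec_ocr_type; infer_instance

-- ===== CLAIM (what is proved, stated in full; the proofs are below) =====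
def Claim_equal_ocr_type : Prop := ∀ (asset_pages : List (List (String × Option String))), Dom_ocr_type asset_pages → Pre_ocr_type asset_pages → Spec_ocr_type asset_pages (ocr_type asset_pages)

-- ===== LEMMAS AND PROOFS =====

-- the class of a page is one of the three join values
theorem pvCls_cases (t : Option String) :
    pvCls t = "ocr" ∨ pvCls t = "digital" ∨ pvCls t = "mixed" := by
  unfold pvCls
  by_cases h1 : t = some "ocr"
  · simp [h1]
  · by_cases h2 : t = some "digital"
    · simp [h2]
    · simp [h1, h2]

theorem pvCls_eq_ocr (t : Option String) : (pvCls t = "ocr") ↔ t = some "ocr" := by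
  unfold pvCls
  by_cases h1 : t = some "ocr"
  · simp [h1]
  · by_cases h2 : t = some "digital"
    · simp [h2]
    · simp [h1, h2]

theorem pvCls_eq_digital (t : Option String) : (pvCls t = "digital") ↔ t = some "digital" := by
  unfold pvCls
  by_cases h1 : t = some "ocr"
  · simp [h1]
  · by_cases h2 : t = some "digital"
    · simp [h2]
    · simp [h1, h2]

theorem pvCls_beq_ocr (t : Option String) :
    (pvCls t == "ocr") = (t == some "ocr") := by
  by_cases h : t = some "ocr"
  · subst h; simp [pvCls]
  · have h2 : pvCls t ≠ "ocr" := fun hc => h ((pvCls_eq_ocr t).mp hc)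
    simp [h, h2]

theorem pvCls_beq_digital (t : Option String) :
    (pvCls t == "digital") = (t == some "digital") := by
  by_cases h : t = some "digital"
  · subst h; simp [pvCls]
  · have h2 : pvCls t ≠ "digital" := fun hc => h ((pvCls_eq_digital t).mp hc)
    simp [h, h2]

-- running the join fold from a non-empty accumulator
theorem pvJoin_run (l : List String) (r : String) (hr : r ≠ "") :
    l.foldl pvJoin r = if l.all (· == r) then r else "mixed" := by
  induction l generalizing r with
  | nil => simp
  | cons x xs ih =>
    by_cases hx : x = r
    · subst hx
      have : pvJoin x x = x := by simp [pvJoin]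
      simp only [List.foldl_cons, this, ih x hr]
      simp
    · have h1 : pvJoin r x = "mixed" := by
        simp [pvJoin, hr, Ne.symm hx]
      have h2 : xs.foldl pvJoin "mixed" = "mixed" := by
        rw [ih "mixed" (by decide)]
        split <;> rfl
      simp only [List.foldl_cons, h1, h2]
      have : ((x :: xs).all (· == r)) = false := by simp [hx]
      simp [this]

-- full characterisation of the join fold when every element is a class value
theorem pvJoin_char (l : List String)
    (hl : ∀ x ∈ l, x = "ocr" ∨ x = "digital" ∨ x = "mixed") :
    l.foldl pvJoin "" =
      if l.length = 0 then ""
      else if l.all (· == "ocr") then "ocr"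
      else if l.all (· == "digital") then "digital"
      else "mixed" := by
  cases l with
  | nil => simp
  | cons c cs =>
    have hc := hl c (by simp)
    have hstep : pvJoin "" c = c := by simp [pvJoin]
    simp only [List.foldl_cons, hstep, List.length_cons]
    have hcne : c ≠ "" := by rcases hc with h | h | h <;> simp [h]
    rw [pvJoin_run cs c hcne]
    rcases hc with h | h | h <;> subst h
    · by_cases hall : cs.all (· == "ocr")
      · simp [hall]
      · have h2 : ((("ocr" : String) :: cs).all (· == "ocr")) = false := by
          simp_all
        have h3 : ((("ocr" : String) :: cs).all (· == "digital")) = false := by simp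
        simp [hall, h2, h3]
    · by_cases hall : cs.all (· == "digital")
      · have : ((("digital" : String) :: cs).all (· == "ocr")) = false := by simp
        simp [hall, this]
      · have h2 : ((("digital" : String) :: cs).all (· == "ocr")) = false := by simp
        have h3 : ((("digital" : String) :: cs).all (· == "digital")) = false := by
          simp_all
        simp [hall, h2, h3]
    · have h2 : ((("mixed" : String) :: cs).all (· == "ocr")) = false := by simp
      have h3 : ((("mixed" : String) :: cs).all (· == "digital")) = false := by simp
      cases h4 : (cs.all (· == "mixed")) <;> simp [h2, h3]

-- B's fold over all pages is the join fold over the classes of the kept pages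
theorem alt_as_join (asset_pages : List (List (String × Option String))) :
    ocr_type_alt asset_pages =
      ((asset_pages.filter pvKeep).map (fun page => pvCls (pvVal page "ocr_type"))).foldl
        pvJoin "" := by
  unfold ocr_type_alt
  rw [List.foldl_map, List.foldl_filter]
  congr 1
  funext r page
  unfold pvKeep
  by_cases h1 : pvTruthy (pvVal page "title_page_type") <;>
    by_cases h2 : pvTruthy (pvVal page "ocr_type") <;> simp [h1, h2]

-- ===== VERDICT (by name: the statement is the Claim_ definition above) =====
theorem ocr_type_spec : Claim_equal_ocr_type := by
  intro asset_pages _ _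
  unfold Spec_ocr_type ocr_type
  rw [alt_as_join]
  set filtered := asset_pages.filter pvKeep with hf
  set l := filtered.map (fun page => pvCls (pvVal page "ocr_type")) with hl
  rw [pvJoin_char l (by
    intro x hx
    rw [hl] at hx
    obtain ⟨p, _, rfl⟩ := List.mem_map.mp hx
    exact pvCls_cases _)]
  have hlen : l.length = filtered.length := by simp [hl]
  have hocr : (filtered.all (fun page => pvVal page "ocr_type" == some "ocr")) =
      l.all (· == "ocr") := by
    rw [hl, List.all_map]
    congr 1
    funext p
    exact (pvCls_beq_ocr _).symm
  have hdig : (filtered.all (fun page => pvVal page "ocr_type" == some "digital")) =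
      l.all (· == "digital") := by
    rw [hl, List.all_map]
    congr 1
    funext p
    exact (pvCls_beq_digital _).symm
  simp only [hlen, hocr, hdig]
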